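-- pv_equiv track=rewrite | github.com/Kalpitadhao77/Live-Stock-Data-Strategy-Backtesting | IITI_UNSTOP.py | maxcontprofit
-- ===== SOURCE A (Python) =====
-- def maxcontprofit(sl,bl):
--     maxlc=0
--     ans=0
--     for i in range(len(sl)):
--         if sl[i]-bl[i]>0:
--             maxlc=maxlc+1
--         if sl[i]-bl[i]<=0:
--             ans=max(ans,maxlc)
--             maxlc=0
--     return ans
-- ===== SOURCE B (Python) =====
-- def maxcontprofit(sl, bl):
--     # Separator-index decomposition: a block between consecutive non-positive
--     # diffs is a run of strictly positive diffs; the trailing block after the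
--     # last separator is (as in A) never counted.
--     diffs = [sl[i] - bl[i] for i in range(len(sl))]
--     seps = [i for i, d in enumerate(diffs) if d <= 0]
--     best = 0
--     start = 0
--     for s in seps:
--         best = max(best, s - start)
--         start = s + 1
--     return best
-- ===== Notes on version B (the rewrite author's own statement) =====
-- stated objective: alternative
-- what changed: Replaces A's running-counter state machine (increment on positive diff, reset-and-max on non-positive) with a two-phase decomposition: build the diff list, collect the indices of non-positive diffs as separators, and take the maximum gap between consecutive separators, which is the length of each positive block; the trailing block is naturally never counted, as in A.
import Mathlib
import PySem

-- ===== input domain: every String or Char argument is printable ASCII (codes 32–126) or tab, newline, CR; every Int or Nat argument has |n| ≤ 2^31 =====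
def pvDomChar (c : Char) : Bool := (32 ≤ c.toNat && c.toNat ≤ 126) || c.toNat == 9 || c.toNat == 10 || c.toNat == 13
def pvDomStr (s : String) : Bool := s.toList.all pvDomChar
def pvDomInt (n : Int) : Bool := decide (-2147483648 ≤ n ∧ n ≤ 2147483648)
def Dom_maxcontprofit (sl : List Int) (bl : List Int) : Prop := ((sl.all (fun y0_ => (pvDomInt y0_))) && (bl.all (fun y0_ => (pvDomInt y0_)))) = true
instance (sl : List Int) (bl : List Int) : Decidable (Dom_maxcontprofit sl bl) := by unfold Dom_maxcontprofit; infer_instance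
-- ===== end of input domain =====

-- B replaces A's running counter with a separator-index decomposition (collect non-positive-diff
-- indices, take max gap between consecutive separators): an alternative of the same cost.


-- ===== PORT A =====
def maxcontprofit (sl : List Int) (bl : List Int) : Int :=
  let st := (PySem.List.pyRange 0 sl.length 1).foldl
    (fun (st : Int × Int) i =>
      let maxlc := if PySem.List.pyGetD sl i 0 - PySem.List.pyGetD bl i 0 > 0 then st.1 + 1 else st.1
      if PySem.List.pyGetD sl i 0 - PySem.List.pyGetD bl i 0 ≤ 0 then (0, max st.2 maxlc) else (maxlc, st.2))
    (0, 0)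
  st.2

-- ===== PORT B =====
def maxcontprofit_alt (sl : List Int) (bl : List Int) : Int :=
  let diffs := (PySem.List.pyRange 0 sl.length 1).map
    (fun i => PySem.List.pyGetD sl i 0 - PySem.List.pyGetD bl i 0)
  let seps := ((PySem.List.enumerate diffs 0).filter (fun p => p.2 ≤ 0)).map (·.1)
  (seps.foldl (fun (st : Int × Int) s => (max st.1 (s - st.2), s + 1)) (0, 0)).1

-- ===== PRECONDITION & SPEC =====
-- Pre_ excludes exactly the inputs where Python A raises IndexError: bl shorter than sl.
def Pre_maxcontprofit (sl : List Int) (bl : List Int) : Prop := sl.length ≤ bl.length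
instance (sl : List Int) (bl : List Int) : Decidable (Pre_maxcontprofit sl bl) := by unfold Pre_maxcontprofit; infer_instance
def pvWitness_maxcontprofit : List Int × List Int := ([3, 1, 5, 2], [1, 2, 1, 1])

def Spec_maxcontprofit (sl : List Int) (bl : List Int) (out : Int) : Prop := out = maxcontprofit_alt sl bl
instance (sl : List Int) (bl : List Int) (out : Int) : Decidable (Spec_maxcontprofit sl bl out) := by unfold Spec_maxcontprofit; infer_instance

-- ===== CLAIM (what is proved, stated in full; the proofs are below) =====
def Claim_equal_maxcontprofit : Prop := ∀ (sl : List Int) (bl : List Int), Dom_maxcontprofit sl bl → Pre_maxcontprofit sl bl → Spec_maxcontprofit sl bl (maxcontprofit sl bl)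

-- ===== LEMMAS AND PROOFS =====

-- A's counter fold and B's separator fold agree on any diff list, for corresponding states:
-- A's counter equals (current index) - (index after last separator).
theorem pv_key (ds : List Int) (s start ans : Int) :
    (ds.foldl
      (fun (st : Int × Int) d =>
        let maxlc := if d > 0 then st.1 + 1 else st.1
        if d ≤ 0 then (0, max st.2 maxlc) else (maxlc, st.2))
      (s - start, ans)).2
    = ((((PySem.List.enumerate ds s).filter (fun p => p.2 ≤ 0)).map (·.1)).foldl
        (fun (st : Int × Int) x => (max st.1 (x - st.2), x + 1)) (ans, start)).1 := by
  induction ds generalizing s start ans with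
  | nil => simp [PySem.List.enumerate]
  | cons d ds ih =>
    simp only [List.foldl_cons, PySem.List.enumerate_cons, List.filter_cons]
    by_cases hd : d ≤ 0
    · have hpos : ¬ d > 0 := by omega
      simp only [hd, hpos, if_true, if_false, decide_true, List.map_cons, List.foldl_cons]
      simpa using ih (s + 1) (s + 1) (max ans (s - start))
    · have hpos : d > 0 := by omega
      simp only [hd, hpos, if_true, if_false, decide_false]
      simpa [show s - start + 1 = (s + 1) - start from by ring] using ih (s + 1) start ans

-- ===== VERDICT (by name: the statement is the Claim_ definition above) =====
theorem maxcontprofit_spec : Claim_equal_maxcontprofit := by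
  intro sl bl _ _
  unfold Spec_maxcontprofit maxcontprofit maxcontprofit_alt
  have h := pv_key ((PySem.List.pyRange 0 sl.length 1).map
      (fun i => PySem.List.pyGetD sl i 0 - PySem.List.pyGetD bl i 0)) 0 0 0
  rw [List.foldl_map] at h
  simpa using h
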